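-- pv_equiv track=rewrite | github.com/chinmaymokashicm/programming | decibinary.py | decibinary2decimal
-- ===== SOURCE A (Python) =====
-- def decibinary2decimal(int_decibinary):
--     """Converts decibinary to decimal
--
--     Args:
--         int_decibinary (int): decibinary integer
--     """
--     if(not isinstance(int_decibinary, int)):
--         raise ValueError("Requires integer, found {}".format(type(int_decibinary)))
--
--     int_decimal = 0
--     str_decibinary = str(int_decibinary)
--     len_int_decibinary = len(str_decibinary)
--     for digit, digit_value in enumerate(str_decibinary):
--         int_decimal += int(digit_value) * pow(2, len_int_decibinary - digit - 1)
--
--     return(int_decimal)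
-- ===== SOURCE B (Python) =====
-- def decibinary2decimal(int_decibinary):
--     """Converts decibinary to decimal (Horner's method)."""
--     if(not isinstance(int_decibinary, int)):
--         raise ValueError("Requires integer, found {}".format(type(int_decibinary)))
--     acc = 0
--     for c in str(int_decibinary):
--         acc = acc * 2 + int(c)
--     return acc
-- ===== Notes on version B (the rewrite author's own statement) =====
-- stated objective: simpler
-- what changed: Replaces the position-indexed power sum (pow(2, len-i-1) recomputed per digit via enumerate) with Horner's method maintaining a single running accumulator acc = acc*2 + int(c).
-- outside the precondition, e.g. on decibinary2decimal(-5): A raises ValueError, B raises ValueError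
import Mathlib
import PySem

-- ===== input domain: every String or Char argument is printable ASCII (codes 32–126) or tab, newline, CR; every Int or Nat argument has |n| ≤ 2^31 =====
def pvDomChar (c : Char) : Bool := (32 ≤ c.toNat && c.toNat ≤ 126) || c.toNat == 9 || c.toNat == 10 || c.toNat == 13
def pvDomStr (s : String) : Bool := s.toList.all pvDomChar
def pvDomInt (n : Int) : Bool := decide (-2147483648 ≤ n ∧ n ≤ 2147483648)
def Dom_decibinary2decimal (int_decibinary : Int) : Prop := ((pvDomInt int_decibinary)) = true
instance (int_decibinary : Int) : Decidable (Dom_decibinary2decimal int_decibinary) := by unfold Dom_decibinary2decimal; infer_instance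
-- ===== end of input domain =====

-- B replaces A's per-position pow(2, len-i-1) sum with a single Horner accumulator (objective: simpler).

-- int(c) for a one-character string; Pre_ (nonnegative input) guarantees every
-- character is a digit, so the `none` (ValueError) case is never hit inside Pre_.
def pvDigit (c : Char) : Int := (PySem.Int.ofChars? [c]).getD 0

-- ===== PORT A =====
-- A: enumerate over str(n), summing int(c) * pow(2, len - i - 1).
-- Inside the loop len - i - 1 ≥ 0, so pow(2, k) is 2^(k.toNat) exactly.
def decibinary2decimal (int_decibinary : Int) : Int :=
  let str_decibinary : List Char := PySem.Int.toChars int_decibinary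
  let len_int_decibinary : Int := str_decibinary.length
  (PySem.List.enumerate str_decibinary 0).foldl
    (fun int_decimal p =>
      int_decimal + pvDigit p.2 * (2 : Int) ^ (len_int_decibinary - p.1 - 1).toNat) 0

-- ===== PORT B =====
def decibinary2decimal_alt (int_decibinary : Int) : Int :=
  (PySem.Int.toChars int_decibinary).foldl (fun acc c => acc * 2 + pvDigit c) 0

-- ===== PRECONDITION & SPEC =====
-- Pre_ excludes negative inputs: on them str(n) starts with '-' and BOTH Pythons
-- raise ValueError at int('-').
def Pre_decibinary2decimal (int_decibinary : Int) : Prop := 0 ≤ int_decibinary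
instance (int_decibinary : Int) : Decidable (Pre_decibinary2decimal int_decibinary) := by
  unfold Pre_decibinary2decimal; infer_instance
def pvWitness_decibinary2decimal : Int := 23

def Spec_decibinary2decimal (int_decibinary : Int) (out : Int) : Prop :=
  out = decibinary2decimal_alt int_decibinary
instance (int_decibinary : Int) (out : Int) : Decidable (Spec_decibinary2decimal int_decibinary out) := by
  unfold Spec_decibinary2decimal; infer_instance

-- ===== CLAIM (what is proved, stated in full; the proofs are below) =====
def Claim_equal_decibinary2decimal : Prop :=
  ∀ (int_decibinary : Int), Dom_decibinary2decimal int_decibinary →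
    Pre_decibinary2decimal int_decibinary →
      Spec_decibinary2decimal int_decibinary (decibinary2decimal int_decibinary)

-- ===== LEMMAS AND PROOFS =====

-- Horner's fold with accumulator acc equals acc·2^len plus the fold from 0.
theorem horner_acc (cs : List Char) (acc : Int) :
    cs.foldl (fun a c => a * 2 + pvDigit c) acc
      = acc * 2 ^ cs.length + cs.foldl (fun a c => a * 2 + pvDigit c) 0 := by
  induction cs generalizing acc with
  | nil => simp
  | cons c cs ih =>
    simp only [List.foldl_cons, List.length_cons]
    rw [ih (acc * 2 + pvDigit c), ih (0 * 2 + pvDigit c)]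
    ring

-- A's indexed-power fold, generalized over the enumerate start and accumulator.
theorem afold_eq (L : Int) : ∀ (cs : List Char) (s : Int) (acc : Int),
    s + cs.length = L →
    (PySem.List.enumerate cs s).foldl
        (fun a p => a + pvDigit p.2 * (2 : Int) ^ (L - p.1 - 1).toNat) acc
      = acc + cs.foldl (fun a c => a * 2 + pvDigit c) 0 := by
  intro cs
  induction cs with
  | nil => intro s acc _; simp [PySem.List.enumerate_nil]
  | cons c cs ih =>
    intro s acc h
    rw [PySem.List.enumerate_cons, List.foldl_cons]
    rw [ih (s + 1) _ (by simp only [List.length_cons] at h; push_cast at h ⊢; omega)]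
    rw [List.foldl_cons, horner_acc cs (0 * 2 + pvDigit c)]
    have hexp : (L - s - 1).toNat = cs.length := by
      simp only [List.length_cons] at h; push_cast at h; omega
    rw [hexp]
    ring

-- ===== VERDICT (by name: the statement is the Claim_ definition above) =====
theorem decibinary2decimal_spec : Claim_equal_decibinary2decimal := by
  intro n _ _
  unfold Spec_decibinary2decimal decibinary2decimal decibinary2decimal_alt
  exact (afold_eq _ _ 0 0 (by simp)).trans (by simp)
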